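-- pv_equiv track=rewrite | github.com/ochavarria/Proyectos-TEC | Progras/Python/Introduccion/Calendario.py | buscando_Fecha
-- ===== SOURCE A (Python) =====
-- def buscando_Fecha(lista,Fecha):
--     if(lista==[]):
--         return []
--     else:
--         if(pertenece(lista[0],Fecha)):
--             return lista[0]+buscando_Fecha(lista[1:],Fecha)
--
--         else:
--             return buscando_Fecha(lista[1:],Fecha)
--
-- def pertenece(lista,inp):
--     if(lista==[]):
--         return False
--     else:
--         if(lista[0]==inp):
--             return True
--         else:
--             return pertenece(lista[1:],inp)
-- ===== SOURCE B (Python) =====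
-- def buscando_Fecha(lista, Fecha):
--     result = []
--     for sub in lista:
--         if Fecha in sub:
--             result = result + sub
--     return result
-- ===== Notes on version B (the rewrite author's own statement) =====
-- stated objective: faster
-- what changed: Replaces the double recursion (buscando_Fecha over sublists, pertenece over elements, each via O(n) list slicing lista[1:]) with a single iterative accumulation loop using Python's `in` membership test.
import Mathlib
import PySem

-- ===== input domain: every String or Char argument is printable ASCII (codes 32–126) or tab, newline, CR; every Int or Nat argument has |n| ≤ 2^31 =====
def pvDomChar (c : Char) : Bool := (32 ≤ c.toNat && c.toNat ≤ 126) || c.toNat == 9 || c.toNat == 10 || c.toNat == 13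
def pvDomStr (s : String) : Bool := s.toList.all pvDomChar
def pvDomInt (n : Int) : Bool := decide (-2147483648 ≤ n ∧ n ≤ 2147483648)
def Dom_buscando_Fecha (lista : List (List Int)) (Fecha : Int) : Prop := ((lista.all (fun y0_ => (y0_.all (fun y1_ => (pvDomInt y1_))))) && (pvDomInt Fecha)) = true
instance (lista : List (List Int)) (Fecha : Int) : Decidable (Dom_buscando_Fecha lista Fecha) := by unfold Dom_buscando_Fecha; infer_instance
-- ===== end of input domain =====

-- B replaces the two mutual recursions (over sublists and over elements) by one
-- iterative accumulation loop using Python's `in`; objective: simpler.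

-- ===== PORT A =====
-- helper pertenece: recursive membership test, step for step
def pertenece (lista : List Int) (inp : Int) : Bool :=
  match lista with
  | [] => false
  | x :: rest => if x == inp then true else pertenece rest inp

def buscando_Fecha (lista : List (List Int)) (Fecha : Int) : List Int :=
  match lista with
  | [] => []
  | sub :: rest =>
      if pertenece sub Fecha then sub ++ buscando_Fecha rest Fecha
      else buscando_Fecha rest Fecha

-- ===== PORT B =====
-- iterative loop: result starts empty, result = result + sub whenever Fecha in sub
def buscando_Fecha_alt (lista : List (List Int)) (Fecha : Int) : List Int :=
  lista.foldl (fun result sub => if Fecha ∈ sub then result ++ sub else result) []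

-- ===== PRECONDITION & SPEC =====
def Spec_buscando_Fecha (lista : List (List Int)) (Fecha : Int) (out : List Int) : Prop := out = buscando_Fecha_alt lista Fecha
instance (lista : List (List Int)) (Fecha : Int) (out : List Int) : Decidable (Spec_buscando_Fecha lista Fecha out) := by unfold Spec_buscando_Fecha; infer_instance

-- ===== CLAIM (what is proved, stated in full; the proofs are below) =====
def Claim_equal_buscando_Fecha : Prop := ∀ (lista : List (List Int)) (Fecha : Int), Dom_buscando_Fecha lista Fecha → Spec_buscando_Fecha lista Fecha (buscando_Fecha lista Fecha)

-- ===== LEMMAS AND PROOFS =====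
theorem pertenece_eq_mem (lista : List Int) (inp : Int) :
    pertenece lista inp = decide (inp ∈ lista) := by
  induction lista with
  | nil => simp [pertenece]
  | cons x rest ih =>
      simp [pertenece, ih]
      by_cases h : x = inp <;> simp [h, eq_comm]
      exact fun he => absurd he.symm h

theorem foldl_acc (lista : List (List Int)) (Fecha : Int) (acc : List Int) :
    lista.foldl (fun result sub => if Fecha ∈ sub then result ++ sub else result) acc
      = acc ++ buscando_Fecha lista Fecha := by
  induction lista generalizing acc with
  | nil => simp [buscando_Fecha]
  | cons sub rest ih =>
      simp only [List.foldl_cons, buscando_Fecha, pertenece_eq_mem]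
      by_cases h : Fecha ∈ sub <;> simp [h, ih]

-- ===== VERDICT (by name: the statement is the Claim_ definition above) =====
theorem buscando_Fecha_spec : Claim_equal_buscando_Fecha := by
  intro lista Fecha _
  unfold Spec_buscando_Fecha buscando_Fecha_alt
  simp [foldl_acc]
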